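-- pv_equiv track=rewrite | github.com/Ruslan515/Competitions | coding/Leetcode/Biweekly Contest 93/6263.py | maxJump
-- ===== SOURCE A (Python) =====
-- from typing import List
--
-- def maxJump(stones: List[int]) -> int:
--     answer = 0
--     if len(stones) == 2:
--         answer = stones[1] - stones[0]
--     else:
--         list_delta = [stones[i] - stones[i - 1] for i in range(1, len(stones))]
--         sums_delta = [list_delta[i] + list_delta[i - 1] for i in range(1, len(list_delta))]
--         answer = max(sums_delta)
--
--     return answer
-- ===== SOURCE B (Python) =====
-- def maxJump(stones):
--     if len(stones) == 2:
--         return stones[1] - stones[0]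
--     prev2, prev1 = stones[1], stones[2]
--     best = stones[2] - stones[0]
--     for c in stones[3:]:
--         if c - prev2 > best:
--             best = c - prev2
--         prev2, prev1 = prev1, c
--     return best
-- ===== Notes on version B (the rewrite author's own statement) =====
-- stated objective: faster
-- what changed: B replaces A's two staged intermediate lists (first differences, then sums of adjacent first differences) plus a final max() call with one forward pass carrying a sliding window (prev2, prev1) and a running-best accumulator updated in place; nothing is materialised.
import Mathlib
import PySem

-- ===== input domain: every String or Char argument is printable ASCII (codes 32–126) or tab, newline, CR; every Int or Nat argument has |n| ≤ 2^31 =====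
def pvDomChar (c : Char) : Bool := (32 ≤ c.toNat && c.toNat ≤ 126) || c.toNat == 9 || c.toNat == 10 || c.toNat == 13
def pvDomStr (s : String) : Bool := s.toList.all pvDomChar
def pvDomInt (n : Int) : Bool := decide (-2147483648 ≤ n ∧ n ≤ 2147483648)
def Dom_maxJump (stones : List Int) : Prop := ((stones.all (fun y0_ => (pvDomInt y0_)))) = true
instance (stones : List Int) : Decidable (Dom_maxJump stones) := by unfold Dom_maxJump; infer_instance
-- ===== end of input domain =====

-- B replaces A's two intermediate difference lists and final max() with one forward
-- pass over the stones carrying a sliding window and a running best (objective: faster,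
-- constant-factor: no intermediate list allocations).

-- ===== PORT A =====
def maxJump (stones : List Int) : Int :=
  if stones.length = 2 then
    PySem.List.pyGetD stones 1 0 - PySem.List.pyGetD stones 0 0
  else
    let listDelta := (PySem.List.pyRange 1 (stones.length : Int) 1).map
      (fun i => PySem.List.pyGetD stones i 0 - PySem.List.pyGetD stones (i - 1) 0)
    let sumsDelta := (PySem.List.pyRange 1 (listDelta.length : Int) 1).map
      (fun i => PySem.List.pyGetD listDelta i 0 + PySem.List.pyGetD listDelta (i - 1) 0)
    -- Python's max raises on the empty list; Pre_ guarantees sumsDelta ≠ [] here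
    (PySem.List.max? sumsDelta (fun x => x)).getD 0

-- ===== PORT B =====
-- single forward pass; state = (prev2, prev1, best), exactly Source B's loop
def maxJump_alt (stones : List Int) : Int :=
  if stones.length = 2 then
    PySem.List.pyGetD stones 1 0 - PySem.List.pyGetD stones 0 0
  else
    ((PySem.List.slice stones (some 3) none).foldl
      (fun (st : Int × Int × Int) c =>
        (st.2.1, c, if st.2.2 < c - st.1 then c - st.1 else st.2.2))
      (PySem.List.pyGetD stones 1 0, PySem.List.pyGetD stones 2 0,
       PySem.List.pyGetD stones 2 0 - PySem.List.pyGetD stones 0 0)).2.2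

-- ===== PRECONDITION & SPEC =====
-- Pre_ excludes only lists of fewer than 2 stones, on which Python A raises ValueError (max of an empty list).
def Pre_maxJump (stones : List Int) : Prop := 2 ≤ stones.length
instance (stones : List Int) : Decidable (Pre_maxJump stones) := by unfold Pre_maxJump; infer_instance
def pvWitness_maxJump : List Int := [0, 2, 5, 10]

def Spec_maxJump (stones : List Int) (out : Int) : Prop := out = maxJump_alt stones
instance (stones : List Int) (out : Int) : Decidable (Spec_maxJump stones out) := by unfold Spec_maxJump; infer_instance

-- ===== CLAIM (what is proved, stated in full; the proofs are below) =====
def Claim_equal_maxJump : Prop := ∀ (stones : List Int), Dom_maxJump stones → Pre_maxJump stones → Spec_maxJump stones (maxJump stones)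

-- ===== LEMMAS AND PROOFS =====

-- the list of second differences stones[i] - stones[i-2], structurally
def sdiffs : Int → Int → List Int → List Int
  | _, _, [] => []
  | a, b, c :: l => (c - a) :: sdiffs b c l

lemma length_sdiffs (a b : Int) (l : List Int) : (sdiffs a b l).length = l.length := by
  induction l generalizing a b with
  | nil => rfl
  | cons c l ih => simp [sdiffs, ih]

lemma getElem_sdiffs (a b : Int) (l : List Int) (k : Nat) (hk : k < l.length) :
    (sdiffs a b l)[k]'(by rw [length_sdiffs]; exact hk)
      = l[k] - (a :: b :: l)[k]'(by simp; omega) := by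
  induction l generalizing a b k with
  | nil => simp at hk
  | cons c l ih =>
    cases k with
    | zero => simp [sdiffs]
    | succ k => simpa [sdiffs] using ih b c k (by simpa using hk)

-- A's sums-of-adjacent-first-differences list is the second-differences list.
lemma sumsDelta_eq_secondDiff (stones : List Int) :
    (PySem.List.pyRange 1 (((PySem.List.pyRange 1 (stones.length : Int) 1).map
        (fun i => PySem.List.pyGetD stones i 0 - PySem.List.pyGetD stones (i - 1) 0)).length : Int) 1).map
      (fun i => PySem.List.pyGetD ((PySem.List.pyRange 1 (stones.length : Int) 1).map
          (fun i => PySem.List.pyGetD stones i 0 - PySem.List.pyGetD stones (i - 1) 0)) i 0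
        + PySem.List.pyGetD ((PySem.List.pyRange 1 (stones.length : Int) 1).map
          (fun i => PySem.List.pyGetD stones i 0 - PySem.List.pyGetD stones (i - 1) 0)) (i - 1) 0)
    = (PySem.List.pyRange 2 (stones.length : Int) 1).map
        (fun i => PySem.List.pyGetD stones i 0 - PySem.List.pyGetD stones (i - 2) 0) := by
  apply List.ext_getElem
  · simp [PySem.List.length_pyRange_one]
    omega
  · intro k hk1 hk2
    simp only [List.getElem_map, PySem.List.getElem_pyRange_one]
    have hb : ((1 : Int) + k) = ((k + 1 : Nat) : Int) := by push_cast; ring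
    have hlen : k + 1 < (((stones.length : Int) - 1).toNat) := by
      simp [PySem.List.length_pyRange_one] at hk2
      omega
    have hlen' : k < (((stones.length : Int) - 1).toNat) := by omega
    rw [hb, PySem.List.pyGetD_map_pyRange_one _ _ _ _ _ (by
          simpa using hlen),
        show ((k + 1 : Nat) : Int) - 1 = ((k : Nat) : Int) by push_cast; ring,
        PySem.List.pyGetD_map_pyRange_one _ _ _ _ _ (by simpa using hlen')]
    push_cast
    ring_nf

-- the second-differences map over indices IS the structural sdiffs list
lemma secondDiff_eq_sdiffs (s0 s1 : Int) (l : List Int) :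
    (PySem.List.pyRange 2 ((s0 :: s1 :: l).length : Int) 1).map
        (fun i => PySem.List.pyGetD (s0 :: s1 :: l) i 0 - PySem.List.pyGetD (s0 :: s1 :: l) (i - 2) 0)
      = sdiffs s0 s1 l := by
  apply List.ext_getElem
  · simp [PySem.List.length_pyRange_one, length_sdiffs]
    omega
  · intro k hk1 hk2
    have hkl : k < l.length := by simpa [length_sdiffs] using hk2
    simp only [List.getElem_map, PySem.List.getElem_pyRange_one]
    rw [getElem_sdiffs s0 s1 l k hkl]
    have h2 : ((2 : Int) + k) = ((k + 2 : Nat) : Int) := by push_cast; ring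
    rw [h2, PySem.List.pyGetD_natCast,
        show ((k + 2 : Nat) : Int) - 2 = ((k : Nat) : Int) by push_cast; ring,
        PySem.List.pyGetD_natCast]
    have : (s0 :: s1 :: l).getD (k + 2) 0 = l[k] := by
      simp [List.getD, List.getElem?_eq_getElem (by simp; omega : k + 2 < (s0 :: s1 :: l).length)]
    rw [this]
    have : (s0 :: s1 :: l).getD k 0 = (s0 :: s1 :: l)[k]'(by simp; omega) := by
      simp [List.getD, List.getElem?_eq_getElem (by simp; omega : k < (s0 :: s1 :: l).length)]
    rw [this]

-- B's fold is the running max of the sdiffs list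
lemma foldl_sdiffs (l : List Int) (a b best : Int) :
    ((l.foldl
      (fun (st : Int × Int × Int) c =>
        (st.2.1, c, if st.2.2 < c - st.1 then c - st.1 else st.2.2))
      (a, b, best)).2.2) = (sdiffs a b l).foldl max best := by
  induction l generalizing a b best with
  | nil => rfl
  | cons c l ih =>
    simp only [List.foldl_cons, sdiffs, ih]
    congr 1
    rcases lt_or_ge best (c - a) with h | h
    · simp [h, max_eq_right (le_of_lt h)]
    · simp [not_lt.mpr h, max_eq_left h]

-- ===== VERDICT (by name: the statement is the Claim_ definition above) =====
theorem maxJump_spec : Claim_equal_maxJump := by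
  intro stones _ hpre
  unfold Spec_maxJump maxJump maxJump_alt
  by_cases h2 : stones.length = 2
  · simp [h2]
  · simp only [h2, if_false]
    have h3 : 3 ≤ stones.length := by
      unfold Pre_maxJump at hpre; omega
    obtain ⟨s0, s1, s2, rest, rfl⟩ :
        ∃ s0 s1 s2 rest, stones = s0 :: s1 :: s2 :: rest := by
      match stones, h3 with
      | s0 :: s1 :: s2 :: rest, _ => exact ⟨s0, s1, s2, rest, rfl⟩
    rw [sumsDelta_eq_secondDiff, secondDiff_eq_sdiffs s0 s1 (s2 :: rest)]
    have hs : PySem.List.slice (s0 :: s1 :: s2 :: rest) (some 3) none = rest := by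
      rw [PySem.List.slice_from _ (by norm_num)]
      rfl
    rw [hs, foldl_sdiffs]
    simp [sdiffs, PySem.List.max?_id_cons, PySem.List.pyGetD_ofNat']
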